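-- pv_equiv track=rewrite | github.com/amirbenun/cloudbeat | .github/scripts/generate_cve_security_statement.py | classify_finding
-- ===== SOURCE A (Python) =====
-- from typing import Any, Dict, Iterable, List, Tuple
--
-- def classify_finding(trace: List[Dict[str, Any]]) -> str:
--     has_function = any(frame.get("function") for frame in trace)
--     has_package = any(frame.get("package") for frame in trace)
--     has_module = any(frame.get("module") for frame in trace)
--
--     if has_function:
--         return "reachable"
--     if has_package:
--         return "imported_not_called"
--     if has_module:
--         return "dependency_present"
--     return "unknown"
-- ===== SOURCE B (Python) =====
-- def classify_finding(trace):
--     has_function = has_package = has_module = False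
--     for frame in trace:
--         if frame.get("function"):
--             has_function = True
--             break
--         if frame.get("package"):
--             has_package = True
--         if frame.get("module"):
--             has_module = True
--     if has_function:
--         return "reachable"
--     if has_package:
--         return "imported_not_called"
--     if has_module:
--         return "dependency_present"
--     return "unknown"
-- ===== Notes on version B (the rewrite author's own statement) =====
-- stated objective: alternative
-- what changed: Replaces the three separate any() scans over trace with a single pass that accumulates has_package/has_module and returns 'reachable' immediately on the first truthy function field.
import Mathlib
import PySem

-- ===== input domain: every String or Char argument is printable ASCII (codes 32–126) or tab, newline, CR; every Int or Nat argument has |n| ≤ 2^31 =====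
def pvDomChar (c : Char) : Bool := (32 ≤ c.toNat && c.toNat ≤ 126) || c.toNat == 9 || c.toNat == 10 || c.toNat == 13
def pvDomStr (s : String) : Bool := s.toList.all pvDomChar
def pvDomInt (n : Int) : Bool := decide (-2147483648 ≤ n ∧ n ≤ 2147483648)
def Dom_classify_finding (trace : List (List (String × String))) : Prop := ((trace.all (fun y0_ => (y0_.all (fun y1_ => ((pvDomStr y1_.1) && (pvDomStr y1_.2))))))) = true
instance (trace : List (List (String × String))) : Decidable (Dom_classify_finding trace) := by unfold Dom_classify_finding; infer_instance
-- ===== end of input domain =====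

-- B replaces A's three separate any() scans with one early-exiting pass; same return value everywhere.

-- frame.get(k) truthiness: first match in the assoc list, truthy iff present and non-empty
def cfTruthy (frame : List (String × String)) (k : String) : Bool :=
  match frame.find? (fun p => p.1 == k) with
  | some p => !(p.2 == "")
  | none => false

-- ===== PORT A =====
def classify_finding (trace : List (List (String × String))) : String :=
  let has_function := trace.any (fun f => cfTruthy f "function")
  let has_package := trace.any (fun f => cfTruthy f "package")
  let has_module := trace.any (fun f => cfTruthy f "module")
  if has_function then "reachable"
  else if has_package then "imported_not_called"
  else if has_module then "dependency_present"
  else "unknown"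

-- ===== PORT B =====
def cfLoop : List (List (String × String)) → Bool → Bool → String
  | [], hp, hm =>
    if hp then "imported_not_called"
    else if hm then "dependency_present"
    else "unknown"
  | f :: rest, hp, hm =>
    if cfTruthy f "function" then "reachable"
    else cfLoop rest (hp || cfTruthy f "package") (hm || cfTruthy f "module")

def classify_finding_alt (trace : List (List (String × String))) : String :=
  cfLoop trace false false

-- ===== PRECONDITION & SPEC =====
def Spec_classify_finding (trace : List (List (String × String))) (out : String) : Prop := out = classify_finding_alt trace
instance (trace : List (List (String × String))) (out : String) : Decidable (Spec_classify_finding trace out) := by unfold Spec_classify_finding; infer_instance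

-- ===== CLAIM (what is proved, stated in full; the proofs are below) =====
def Claim_equal_classify_finding : Prop := ∀ (trace : List (List (String × String))), Dom_classify_finding trace → Spec_classify_finding trace (classify_finding trace)

-- ===== LEMMAS AND PROOFS =====
theorem cfLoop_char (trace : List (List (String × String))) (hp hm : Bool) :
    cfLoop trace hp hm =
      (if trace.any (fun f => cfTruthy f "function") then "reachable"
       else if hp || trace.any (fun f => cfTruthy f "package") then "imported_not_called"
       else if hm || trace.any (fun f => cfTruthy f "module") then "dependency_present"
       else "unknown") := by
  induction trace generalizing hp hm with
  | nil => simp [cfLoop]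
  | cons f rest ih =>
    simp only [cfLoop, List.any_cons]
    by_cases hf : cfTruthy f "function" = true
    · simp [hf]
    · simp [hf, ih, Bool.or_assoc]

-- ===== VERDICT (by name: the statement is the Claim_ definition above) =====
theorem classify_finding_spec : Claim_equal_classify_finding := by
  intro trace _
  unfold Spec_classify_finding classify_finding classify_finding_alt
  rw [cfLoop_char]
  simp
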